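-- pv_equiv track=rewrite | github.com/josedelamare/NSI-TAD | alice.py | ajouter_tete
-- ===== SOURCE A (Python) =====
-- def ajouter_tete(n, t):
--     """ insère l'élément n en tête de la liste """
--     if len(t) == 0:
--         new_t = [n]
--     else:
--         new_t = t + [None]
--         for i in range(len(t)-1, -1, -1):
--             new_t[i+1] = t[i]
--         new_t[0] = n
--     return new_t
-- ===== SOURCE B (Python) =====
-- def ajouter_tete(n, t):
--     """ insère l'élément n en tête de la liste """
--     return [n] + t
-- ===== Notes on version B (the rewrite author's own statement) =====
-- stated objective: simpler
-- what changed: Replaces the None-padded buffer and the explicit descending index-shifting loop with a single closed-form concatenation [n] + t.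
import Mathlib
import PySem

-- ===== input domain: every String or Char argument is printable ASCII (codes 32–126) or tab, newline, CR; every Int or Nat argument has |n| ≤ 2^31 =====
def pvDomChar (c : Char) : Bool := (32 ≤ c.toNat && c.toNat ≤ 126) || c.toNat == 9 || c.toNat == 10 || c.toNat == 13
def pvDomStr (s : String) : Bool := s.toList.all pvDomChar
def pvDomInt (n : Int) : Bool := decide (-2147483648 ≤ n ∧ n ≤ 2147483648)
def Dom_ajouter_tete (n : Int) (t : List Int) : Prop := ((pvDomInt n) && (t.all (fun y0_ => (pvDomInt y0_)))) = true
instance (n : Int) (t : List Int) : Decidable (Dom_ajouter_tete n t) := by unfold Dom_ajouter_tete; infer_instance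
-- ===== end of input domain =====

-- B replaces A's None-padded buffer and descending index-shifting loop with the closed form [n] + t (simpler; no mutation in either version's observable behaviour — both return a fresh list).

-- ===== PORT A =====
-- the 'for i in range(len(t)-1, -1, -1): new_t[i+1] = t[i]' loop, as a countdown recursion
-- over the same state; first iteration is i = len(t)-1, matching Python's descending order.
def ajouterLoop (t : List Int) : Nat → List (Option Int) → List (Option Int)
  | 0, acc => acc
  | i+1, acc =>
      ajouterLoop t i (PySem.List.pySetD acc ((i : Int) + 1) (some (PySem.List.pyGetD t (i : Int) 0)))

-- buffer cells are Option Int ('t + [None]'); the final '.map (·.getD 0)' only extracts the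
-- Int from cells that are all 'some' at that point (List Int is the required return type).
def ajouter_tete (n : Int) (t : List Int) : List Int :=
  if t.length = 0 then [n]
  else
    (PySem.List.pySetD (ajouterLoop t t.length (t.map some ++ [none])) 0 (some n)).map
      (fun o => o.getD 0)

-- ===== PORT B =====
def ajouter_tete_alt (n : Int) (t : List Int) : List Int := [n] ++ t

-- ===== PRECONDITION & SPEC =====
def Spec_ajouter_tete (n : Int) (t : List Int) (out : List Int) : Prop := out = ajouter_tete_alt n t
instance (n : Int) (t : List Int) (out : List Int) : Decidable (Spec_ajouter_tete n t out) := by unfold Spec_ajouter_tete; infer_instance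

-- ===== CLAIM (what is proved, stated in full; the proofs are below) =====
def Claim_equal_ajouter_tete : Prop := ∀ (n : Int) (t : List Int), Dom_ajouter_tete n t → Spec_ajouter_tete n t (ajouter_tete n t)

-- ===== LEMMAS AND PROOFS =====

-- after i iterations the loop has written t[0..i-1] into slots 1..i, leaving slot 0 and the tail
theorem ajouterLoop_eq (t : List Int) :
    ∀ (i : Nat) (acc : List (Option Int)), i ≤ t.length → acc.length = t.length + 1 →
      ajouterLoop t i acc = acc.take 1 ++ (t.take i).map some ++ acc.drop (i+1) := by
  intro i
  induction i with
  | zero =>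
      intro acc _ hlen
      rw [ajouterLoop]
      simpa using (List.take_append_drop 1 acc).symm
  | succ i ih =>
      intro acc hi hlen
      have hi' : i < t.length := Nat.lt_of_succ_le hi
      have hidx : (i : Int) + 1 = ((i + 1 : Nat) : Int) := by push_cast; ring
      have hset : PySem.List.pySetD acc ((i : Int) + 1) (some (PySem.List.pyGetD t (i : Int) 0))
          = acc.set (i+1) (some t[i]) := by
        rw [hidx, PySem.List.pySetD_natCast]
        congr 1
        rw [PySem.List.pyGetD_natCast]
        simp [List.getElem?_eq_getElem hi']
      have hlt : i + 1 < acc.length := by omega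
      rw [ajouterLoop, hset, ih _ (Nat.le_of_lt hi') (by simp [hlen])]
      have htake1 : (acc.set (i+1) (some t[i])).take 1 = acc.take 1 := by
        rw [List.set_eq_take_append_cons_drop, if_pos hlt]
        rw [List.take_append_of_le_length (by simp; omega)]
        rw [List.take_take]
        simp
      have hdrop : (acc.set (i+1) (some t[i])).drop (i+1) = some t[i] :: acc.drop (i+2) := by
        rw [List.set_eq_take_append_cons_drop, if_pos hlt]
        rw [List.drop_append_of_le_length (by simp; omega)]
        simp
      have httake : List.take (i+1) (List.map some t) = List.take i (List.map some t) ++ [some t[i]] := by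
        rw [List.take_add_one]
        simp [hi']
      rw [htake1, hdrop]
      simp [httake]

theorem ajouter_tete_eq_cons (n : Int) (t : List Int) : ajouter_tete n t = n :: t := by
  cases t with
  | nil => simp [ajouter_tete]
  | cons a s =>
      show ajouter_tete n (a :: s) = n :: a :: s
      unfold ajouter_tete
      have hlen : ((a :: s).map some ++ [(none : Option Int)]).length = (a :: s).length + 1 := by
        simp
      rw [if_neg (by simp)]
      rw [ajouterLoop_eq (a :: s) (a :: s).length _ (le_refl _) hlen]
      simp [List.take_of_length_le, List.drop_of_length_le]
      rw [show ((0:Int)) = ((0:Nat):Int) from rfl, PySem.List.pySetD_natCast]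
      simp

-- ===== VERDICT (by name: the statement is the Claim_ definition above) =====
theorem ajouter_tete_spec : Claim_equal_ajouter_tete := by
  intro n t _
  show ajouter_tete n t = ajouter_tete_alt n t
  rw [ajouter_tete_eq_cons]
  rfl
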